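-- pv_equiv track=rewrite | github.com/RegusAl/UBB | Semestrul 1/Fundamentele Programarii/Tehnici de programare/Divide and Conquer/numarul_de_numere_pozitive.py | numarul_de_numere_pozitive
-- ===== SOURCE A (Python) =====
-- def numarul_de_numere_pozitive(l):
--     if len(l) == 0:
--         return -1
--     if len(l) == 1:
--         if l[0] >= 0:
--             return 1
--         return 0
--     middle = len(l) // 2
--     return numarul_de_numere_pozitive(l[:middle]) + numarul_de_numere_pozitive(l[middle:])
-- ===== SOURCE B (Python) =====
-- def numarul_de_numere_pozitive(l):
--     if len(l) == 0:
--         return -1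
--     count = 0
--     for x in l:
--         if x >= 0:
--             count += 1
--     return count
-- ===== Notes on version B (the rewrite author's own statement) =====
-- stated objective: simpler
-- what changed: Replaced the divide-and-conquer recursion with slicing by a single iterative left-to-right counting pass.
import Mathlib
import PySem

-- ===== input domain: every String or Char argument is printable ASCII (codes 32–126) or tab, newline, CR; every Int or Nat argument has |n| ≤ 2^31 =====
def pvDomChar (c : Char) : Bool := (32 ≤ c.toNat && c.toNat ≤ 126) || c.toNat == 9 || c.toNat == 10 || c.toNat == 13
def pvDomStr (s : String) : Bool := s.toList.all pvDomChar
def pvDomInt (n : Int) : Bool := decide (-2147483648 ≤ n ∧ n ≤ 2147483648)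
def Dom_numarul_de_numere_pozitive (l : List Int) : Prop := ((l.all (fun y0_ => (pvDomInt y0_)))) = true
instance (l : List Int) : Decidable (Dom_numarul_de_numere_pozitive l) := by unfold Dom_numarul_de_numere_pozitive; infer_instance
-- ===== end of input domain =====

-- B replaces A's divide-and-conquer recursion by one iterative counting pass (simpler).

-- ===== PORT A =====
def numarul_de_numere_pozitive (l : List Int) : Int :=
  if l.length = 0 then -1
  else if l.length = 1 then
    match PySem.List.pyGet? l 0 with
    | some x => if x ≥ 0 then 1 else 0
    | none => 0  -- unreachable: length = 1, so index 0 is in range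
  else
    let middle : Nat := l.length / 2
    numarul_de_numere_pozitive (PySem.List.slice l none (some (middle : Int))) +
      numarul_de_numere_pozitive (PySem.List.slice l (some (middle : Int)) none)
termination_by l.length
decreasing_by
  · rw [PySem.List.slice_to_natCast]
    simp only [List.length_take]
    omega
  · rw [PySem.List.slice_from_natCast]
    simp only [List.length_drop]
    omega

-- ===== PORT B =====
def numarul_de_numere_pozitive_alt (l : List Int) : Int :=
  if l = [] then -1
  else l.foldl (fun count x => if x ≥ 0 then count + 1 else count) 0

-- ===== PRECONDITION & SPEC =====
def Spec_numarul_de_numere_pozitive (l : List Int) (out : Int) : Prop := out = numarul_de_numere_pozitive_alt l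
instance (l : List Int) (out : Int) : Decidable (Spec_numarul_de_numere_pozitive l out) := by unfold Spec_numarul_de_numere_pozitive; infer_instance

-- ===== CLAIM (what is proved, stated in full; the proofs are below) =====
def Claim_equal_numarul_de_numere_pozitive : Prop := ∀ (l : List Int), Dom_numarul_de_numere_pozitive l → Spec_numarul_de_numere_pozitive l (numarul_de_numere_pozitive l)

-- ===== LEMMAS AND PROOFS =====

-- A on a nonempty list computes the count of elements ≥ 0 (strong induction on length).
theorem pvA_eq_countP_aux (n : Nat) : ∀ (l : List Int), l.length ≤ n → l ≠ [] →
    numarul_de_numere_pozitive l = (l.countP (fun x => decide (x ≥ 0)) : Nat) := by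
  induction n with
  | zero =>
    intro l hn h
    exact absurd (List.eq_nil_of_length_eq_zero (by omega)) h
  | succ n ih =>
    intro l hn h
    rw [numarul_de_numere_pozitive]
    by_cases h0 : l.length = 0
    · exact absurd (List.eq_nil_of_length_eq_zero h0) h
    by_cases h1 : l.length = 1
    · obtain ⟨x, hx⟩ : ∃ x, l = [x] := by
        cases l with
        | nil => simp at h1
        | cons a t => cases t with
          | nil => exact ⟨a, rfl⟩
          | cons b u => simp at h1
      subst hx
      simp only [h0, h1, if_false, if_true, List.length_cons, List.length_nil]
      simp [PySem.List.pyGet?, PySem.List.pyIdx?, List.countP, List.countP.go]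
      split <;> simp_all [Bool.cond_eq_if]
    · simp only [h0, h1, if_false]
      rw [PySem.List.slice_to_natCast, PySem.List.slice_from_natCast]
      have hm1 : 1 ≤ l.length / 2 := by omega
      have hm2 : l.length / 2 < l.length := by omega
      rw [ih (l.take (l.length / 2)) (by simp [List.length_take]; omega)
            (by simp [← List.length_pos_iff, List.length_take]; omega),
          ih (l.drop (l.length / 2)) (by simp [List.length_drop]; omega)
            (by simp [← List.length_pos_iff, List.length_drop]; omega)]
      have hsplit : (l.take (l.length / 2)).countP (fun x => decide (x ≥ 0)) +
          (l.drop (l.length / 2)).countP (fun x => decide (x ≥ 0)) =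
          l.countP (fun x => decide (x ≥ 0)) := by
        conv_rhs => rw [← List.take_append_drop (l.length / 2) l]
        rw [List.countP_append]
      omega

theorem pvA_eq_countP (l : List Int) (h : l ≠ []) :
    numarul_de_numere_pozitive l = (l.countP (fun x => decide (x ≥ 0)) : Nat) :=
  pvA_eq_countP_aux l.length l le_rfl h

-- B's fold accumulates the same count.
theorem pvB_foldl (l : List Int) (c : Int) :
    l.foldl (fun count x => if x ≥ 0 then count + 1 else count) c =
      c + (l.countP (fun x => decide (x ≥ 0)) : Nat) := by
  induction l generalizing c with
  | nil => simp
  | cons a t ih =>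
    simp only [List.foldl_cons, List.countP_cons, ih]
    split <;> simp_all <;> push_cast <;> ring

-- ===== VERDICT (by name: the statement is the Claim_ definition above) =====
theorem numarul_de_numere_pozitive_spec : Claim_equal_numarul_de_numere_pozitive := by
  intro l _
  unfold Spec_numarul_de_numere_pozitive numarul_de_numere_pozitive_alt
  by_cases h : l = []
  · subst h; simp [numarul_de_numere_pozitive]
  · simp only [h, if_false]
    rw [pvA_eq_countP l h, pvB_foldl]
    simp
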